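-- pv_equiv track=rewrite | github.com/savyaacadecraft/EmailVerification | Pending/pending.py | has_only_one_max_value
-- ===== SOURCE A (Python) =====
-- def has_only_one_max_value(d):
--
--     if not d:
--         return False
--
--     max_value = max(d.values())
--     if max_value < 1:
--         return False
--
--     count_max_value = sum(1 for value in d.values() if value == max_value)
--     return count_max_value == 1
-- ===== SOURCE B (Python) =====
-- def has_only_one_max_value(d):
--     if not d:
--         return False
--     vals = sorted(d.values())
--     top = vals[-1]
--     if top < 1:
--         return False
--     return len(vals) == 1 or vals[-2] < top
-- ===== Notes on version B (the rewrite author's own statement) =====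
-- stated objective: alternative
-- what changed: B sorts the values once and decides uniqueness of the maximum by comparing the top two sorted values, instead of A's max() scan followed by a second counting scan.
import Mathlib
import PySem

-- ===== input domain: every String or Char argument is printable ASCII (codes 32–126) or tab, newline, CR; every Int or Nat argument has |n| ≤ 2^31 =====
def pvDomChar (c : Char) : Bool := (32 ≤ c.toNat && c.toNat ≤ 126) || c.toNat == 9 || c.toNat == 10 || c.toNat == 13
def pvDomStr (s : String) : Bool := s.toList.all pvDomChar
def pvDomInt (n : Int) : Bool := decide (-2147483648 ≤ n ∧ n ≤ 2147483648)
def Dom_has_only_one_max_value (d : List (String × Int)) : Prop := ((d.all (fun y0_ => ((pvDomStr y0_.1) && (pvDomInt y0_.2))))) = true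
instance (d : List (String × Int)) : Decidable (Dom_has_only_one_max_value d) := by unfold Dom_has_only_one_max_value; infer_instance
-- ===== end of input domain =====

-- B sorts the values once and decides uniqueness of the maximum from the top two
-- sorted values, instead of A's max() scan followed by a counting rescan (objective: alternative).


-- ===== PORT A =====
def has_only_one_max_value (d : List (String × Int)) : Bool :=
  if d = [] then false
  else
    match PySem.List.max? (d.map Prod.snd) (fun v => v) with
    | none => false   -- unreachable: d ≠ [] so values are nonempty
    | some max_value =>
      if max_value < 1 then false
      else
        -- sum(1 for value in d.values() if value == max_value)
        let count_max_value : Int :=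
          (d.map Prod.snd).foldl (fun acc value => if value == max_value then acc + 1 else acc) 0
        decide (count_max_value = 1)

-- ===== PORT B =====
def has_only_one_max_value_alt (d : List (String × Int)) : Bool :=
  if d = [] then false
  else
    let vals := PySem.List.sorted (d.map Prod.snd) (fun v => v) false
    match PySem.List.pyGet? vals (-1) with
    | none => false   -- unreachable: vals nonempty
    | some top =>
      if top < 1 then false
      else
        decide (vals.length = 1) ||
          match PySem.List.pyGet? vals (-2) with
          | none => false   -- unreachable when length ≥ 2
          | some second => decide (second < top)

-- ===== PRECONDITION & SPEC =====
def Spec_has_only_one_max_value (d : List (String × Int)) (out : Bool) : Prop := out = has_only_one_max_value_alt d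
instance (d : List (String × Int)) (out : Bool) : Decidable (Spec_has_only_one_max_value d out) := by unfold Spec_has_only_one_max_value; infer_instance

-- ===== CLAIM (what is proved, stated in full; the proofs are below) =====
def Claim_equal_has_only_one_max_value : Prop := ∀ (d : List (String × Int)), Dom_has_only_one_max_value d → Spec_has_only_one_max_value d (has_only_one_max_value d)

-- ===== LEMMAS AND PROOFS =====

lemma core_eq (l : List Int) (hl : l ≠ []) :
    (match PySem.List.max? l (fun v => v) with
     | none => false
     | some max_value =>
       if max_value < 1 then false
       else decide ((l.foldl (fun acc value => if value == max_value then acc + 1 else acc) (0 : Int)) = 1)) =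
    (let vals := PySem.List.sorted l (fun v => v) false
     match PySem.List.pyGet? vals (-1) with
     | none => false
     | some top =>
       if top < 1 then false
       else
         decide (vals.length = 1) ||
           match PySem.List.pyGet? vals (-2) with
           | none => false
           | some second => decide (second < top)) := by
  obtain ⟨M, hM⟩ : ∃ M, PySem.List.max? l (fun v => v) = some M := by
    obtain ⟨x, t, rfl⟩ := List.exists_cons_of_ne_nil hl
    exact ⟨t.foldl max x, PySem.List.max?_id_cons ..⟩
  have hperm := PySem.List.sorted_perm l (fun v => v) false
  have hpw := PySem.List.sorted_pairwise l (fun v => v)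
  have hsne : PySem.List.sorted l (fun v => v) false ≠ [] :=
    fun h => hl ((h ▸ hperm).symm.eq_nil)
  obtain ⟨s', m, hseq⟩ : ∃ s' m, PySem.List.sorted l (fun v => v) false = s' ++ [m] := by
    rcases List.eq_nil_or_concat (PySem.List.sorted l (fun v => v) false) with h | ⟨s', m, h⟩
    · exact absurd h hsne
    · exact ⟨s', m, by simpa [List.concat_eq_append] using h⟩
  rw [hseq] at hperm hpw
  rw [hseq]
  have hle : ∀ x ∈ s', x ≤ m := by
    intro x hx
    have := (List.pairwise_append.mp hpw).2.2 x hx m (List.mem_singleton_self m)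
    simpa using this
  have hMmax := PySem.List.max?_isMax hM
  have hMmem := PySem.List.max?_mem hM
  have hmM : m ≤ M := hMmax m (hperm.mem_iff.mp (by simp))
  have hMm : M = m := by
    have : M ∈ s' ++ [m] := hperm.mem_iff.mpr hMmem
    rcases List.mem_append.mp this with h | h
    · exact le_antisymm (hle M h) hmM
    · simpa using h
  subst hMm
  rw [hM]
  simp only [PySem.List.pyGet?_neg_one_append_singleton]
  by_cases hlt : M < 1
  · simp [hlt]
  · simp only [if_neg hlt]
    rw [PySem.List.foldl_beq_add_one]
    have hcnt : l.count M = s'.count M + 1 := by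
      rw [← hperm.count_eq]; simp
    by_cases hs' : s' = []
    · subst hs'
      simp at hcnt
      simp [hcnt]
    · -- length ≠ 1 on the right; the (-2) lookup yields the last element of s'
      have hlen1 : (s' ++ [M]).length ≠ 1 := by
        simp only [List.length_append, List.length_singleton]
        have := List.length_pos_of_ne_nil hs'
        omega
      have hpos : 0 < s'.length := List.length_pos_of_ne_nil hs'
      have hget : PySem.List.pyGet? (s' ++ [M]) (-2) = some s'[s'.length - 1] := by
        rw [PySem.List.pyGet?_neg_ofNat (s' ++ [M]) 2 (by omega)
          (by simp only [List.length_append, List.length_singleton]; omega)]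
        have h1 : (s' ++ [M]).length - 2 = s'.length - 1 := by
          simp only [List.length_append, List.length_singleton]; omega
        rw [h1, List.getElem?_append_left (by omega)]
        exact List.getElem?_eq_getElem (by omega)
      rw [hget]
      simp only [decide_eq_false hlen1, Bool.false_or]
      -- M unique in l ↔ last of s' < M
      have hiff : (0 + (l.count M : Int) = 1) ↔ s'[s'.length - 1] < M := by
        rw [hcnt]
        push_cast
        constructor
        · intro h
          have hz : s'.count M = 0 := by omega
          have hnm : M ∉ s' := by
            intro hmem
            exact absurd hz (by simpa [List.count_eq_zero] using hmem)
          have hmem : s'[s'.length - 1] ∈ s' := List.getElem_mem (by omega)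
          exact lt_of_le_of_ne (hle _ hmem) (fun he => hnm (he ▸ hmem))
        · intro h
          have hnm : M ∉ s' := by
            intro hmem
            obtain ⟨i, hi, hMi⟩ := List.mem_iff_getElem.mp hmem
            rcases eq_or_lt_of_le (Nat.le_sub_one_of_lt hi) with he | hlt2
            · have : s'[s'.length - 1] = M := by
                subst he; exact hMi
              rw [this] at h
              exact absurd h (lt_irrefl M)
            · have := (List.pairwise_iff_getElem.mp (List.pairwise_append.mp hpw).1)
                i (s'.length - 1) hi (by omega) hlt2
              rw [hMi] at this
              exact absurd (lt_of_le_of_lt this h) (lt_irrefl _)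
          have : s'.count M = 0 := List.count_eq_zero.mpr hnm
          omega
      simp only [decide_eq_decide]
      exact hiff

-- ===== VERDICT (by name: the statement is the Claim_ definition above) =====
theorem has_only_one_max_value_spec : Claim_equal_has_only_one_max_value := by
  unfold Claim_equal_has_only_one_max_value Spec_has_only_one_max_value
  intro d _
  unfold has_only_one_max_value has_only_one_max_value_alt
  by_cases hd : d = []
  · simp [hd]
  · have hl : d.map Prod.snd ≠ [] := by simpa using hd
    simp only [if_neg hd]
    exact core_eq (d.map Prod.snd) hl
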